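-- pv_equiv track=rewrite | github.com/John75SunCity/ssh-git-github.com-odoo-odoo.git-18.0 | admin-tools/development-tools/odoo_comprehensive_syntax_fixer.py | fix_bracket_mismatches
-- ===== SOURCE A (Python) =====
-- def fix_bracket_mismatches(content):
--     """Fix bracket and brace mismatches"""
--     lines = content.split('\n')
--     fixed_lines = []
--
--     for line in lines:
--         # Fix common bracket issues
--         open_brackets = line.count('[')
--         close_brackets = line.count(']')
--
--         if open_brackets > close_brackets:
--             diff = open_brackets - close_brackets
--             if not line.rstrip().endswith(','):
--                 line = line + ']' * diff
--         elif close_brackets > open_brackets: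
--             diff = close_brackets - open_brackets
--             for _ in range(diff):
--                 line = line.rsplit(']', 1)[0] if ']' in line else line
--
--         # Fix brace issues
--         open_braces = line.count('{')
--         close_braces = line.count('}')
--
--         if open_braces > close_braces:
--             diff = open_braces - close_braces
--             if not line.rstrip().endswith(','):
--                 line = line + '}' * diff
--         elif close_braces > open_braces:
--             diff = close_braces - open_braces
--             for _ in range(diff):
--                 line = line.rsplit('}', 1)[0] if '}' in line else line
--
--         fixed_lines.append(line)
--
--     return '\n'.join(fixed_lines)
-- ===== SOURCE B (Python) =====
-- def _cut_before_nth(line, ch, n):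
--     """Prefix of line ending just before the n-th occurrence of ch (whole line if fewer)."""
--     seen = 0
--     out = []
--     for c in line:
--         if c == ch:
--             seen += 1
--             if seen == n:
--                 return ''.join(out)
--         out.append(c)
--     return line
--
--
-- def fix_bracket_mismatches(content):
--     """Fix bracket and brace mismatches"""
--     fixed = []
--     for line in content.split('\n'):
--         for op, cl in (('[', ']'), ('{', '}')):
--             opens = line.count(op)
--             closes = line.count(cl)
--             if opens > closes:
--                 if not line.rstrip().endswith(','):
--                     line = line + cl * (opens - closes)
--             elif closes > opens:
--                 # one left-to-right scan: keep everything before the (opens+1)-th closer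
--                 line = _cut_before_nth(line, cl, opens + 1)
--         fixed.append(line)
--     return '\n'.join(fixed)
-- ===== Notes on version B (the rewrite author's own statement) =====
-- stated objective: simpler
-- what changed: The per-pair excess-closer repair is rewritten: instead of repeatedly rsplitting off the text after the last closer (diff right-to-left passes), B makes one left-to-right scan that cuts the line just before the first unmatched closing bracket/brace; the two delimiter pairs are handled by one loop over the pairs instead of two copied blocks.
import Mathlib
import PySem

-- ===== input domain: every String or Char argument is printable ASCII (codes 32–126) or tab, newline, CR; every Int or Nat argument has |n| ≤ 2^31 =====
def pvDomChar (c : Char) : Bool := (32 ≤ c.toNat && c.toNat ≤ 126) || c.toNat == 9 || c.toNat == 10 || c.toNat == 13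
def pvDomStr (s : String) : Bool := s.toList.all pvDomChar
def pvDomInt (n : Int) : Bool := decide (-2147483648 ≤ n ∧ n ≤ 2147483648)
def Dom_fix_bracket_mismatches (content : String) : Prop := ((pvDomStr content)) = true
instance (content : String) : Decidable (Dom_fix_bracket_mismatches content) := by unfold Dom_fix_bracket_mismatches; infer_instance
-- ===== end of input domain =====

-- B replaces A's repeated `rsplit`-and-drop loop by a single left-to-right scan that cuts
-- the line just before the first unmatched closer (objective: simpler, one pass instead of
-- `diff` right-to-left passes).

-- ===== PORT A =====
-- hand port of `line.rsplit(c, 1)[0]`: everything before the LAST occurrence of c;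
-- exact whenever c occurs in the line (A only calls it under the guard `c in line`).
def pvRsplitDropA (l : List Char) (c : Char) : List Char :=
  ((l.reverse.dropWhile (fun x => x != c)).drop 1).reverse

def pvFixLineA (line : List Char) : List Char :=
  -- Fix common bracket issues
  let ob := PySem.Chars.count line ['[']
  let cb := PySem.Chars.count line [']']
  let line1 :=
    if ob > cb then
      (if PySem.Chars.endswith (PySem.Chars.rstrip line) [','] then line
       else line ++ List.replicate (ob - cb) ']')
    else if cb > ob then
      (List.range (cb - ob)).foldl
        (fun l _ => if PySem.Chars.isIn [']'] l then pvRsplitDropA l ']' else l) line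
    else line
  -- Fix brace issues
  let obr := PySem.Chars.count line1 ['{']
  let cbr := PySem.Chars.count line1 ['}']
  if obr > cbr then
    (if PySem.Chars.endswith (PySem.Chars.rstrip line1) [','] then line1
     else line1 ++ List.replicate (obr - cbr) '}')
  else if cbr > obr then
    (List.range (cbr - obr)).foldl
      (fun l _ => if PySem.Chars.isIn ['}'] l then pvRsplitDropA l '}' else l) line1
  else line1

def fix_bracket_mismatches (content : String) : String :=
  String.ofList (PySem.Chars.join ['\n']
    ((PySem.Chars.splitOn content.toList ['\n']).map pvFixLineA))

-- ===== PORT B =====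
-- port of Source B's `_cut_before_nth`: scan with an index-free accumulator `out`,
-- return the accumulated prefix at the n-th occurrence of ch, the whole line if fewer.
def pvCutGo (ch : Char) (n : Nat) (line : List Char) :
    List Char → Nat → List Char → List Char
  | [], _, _ => line
  | c :: rest, seen, out =>
    if c == ch then
      (if seen + 1 == n then out
       else pvCutGo ch n line rest (seen + 1) (out ++ [c]))
    else pvCutGo ch n line rest seen (out ++ [c])

def pvCutBeforeNth (line : List Char) (ch : Char) (n : Nat) : List Char :=
  pvCutGo ch n line line 0 []

def pvFixLineB (line0 : List Char) : List Char :=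
  [('[', ']'), ('{', '}')].foldl (fun line pr =>
    let opens := PySem.Chars.count line [pr.1]
    let closes := PySem.Chars.count line [pr.2]
    if opens > closes then
      (if PySem.Chars.endswith (PySem.Chars.rstrip line) [','] then line
       else line ++ List.replicate (opens - closes) pr.2)
    else if closes > opens then pvCutBeforeNth line pr.2 (opens + 1)
    else line) line0

def fix_bracket_mismatches_alt (content : String) : String :=
  String.ofList (PySem.Chars.join ['\n']
    ((PySem.Chars.splitOn content.toList ['\n']).map pvFixLineB))

-- ===== PRECONDITION & SPEC =====
def Spec_fix_bracket_mismatches (content : String) (out : String) : Prop := out = fix_bracket_mismatches_alt content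
instance (content : String) (out : String) : Decidable (Spec_fix_bracket_mismatches content out) := by unfold Spec_fix_bracket_mismatches; infer_instance

-- ===== CLAIM (what is proved, stated in full; the proofs are below) =====
def Claim_equal_fix_bracket_mismatches : Prop := ∀ (content : String), Dom_fix_bracket_mismatches content → Spec_fix_bracket_mismatches content (fix_bracket_mismatches content)

-- ===== LEMMAS AND PROOFS =====

-- PySem.Chars.count of a single-character pattern is List.count
theorem pv_count_go_singleton (c : Char) : ∀ (l : List Char) (fuel acc : Nat), l.length ≤ fuel →
    PySem.Chars.count.go [c] fuel l acc = acc + l.count c := by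
  intro l
  induction l with
  | nil => intro fuel acc h; cases fuel <;> simp [PySem.Chars.count.go]
  | cons x t ih =>
    intro fuel acc h
    cases fuel with
    | zero => simp at h
    | succ f =>
      simp only [PySem.Chars.count.go]
      by_cases hx : x = c
      · subst hx
        simp [List.isPrefixOf, ih f (acc + 1) (by simpa using h)]
        omega
      · simp [List.isPrefixOf, hx, ih f acc (by simpa using h), Ne.symm hx]

theorem pv_count_singleton (cs : List Char) (c : Char) :
    PySem.Chars.count cs [c] = cs.count c := by
  simp [PySem.Chars.count, pv_count_go_singleton c cs cs.length 0 le_rfl]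

-- the canonical "prefix of cs strictly before the n-th occurrence of c" (whole cs if fewer)
def pvPref (c : Char) : Nat → List Char → List Char
  | _, [] => []
  | n, x :: xs => if x = c then (if n = 1 then [] else x :: pvPref c (n - 1) xs)
                  else x :: pvPref c n xs

theorem pvPref_of_count_lt (c : Char) : ∀ (n : Nat) (cs : List Char), cs.count c < n →
    pvPref c n cs = cs := by
  intro n cs
  induction cs generalizing n with
  | nil => intro _; rfl
  | cons x xs ih =>
    intro h
    by_cases hx : x = c
    · subst hx
      have h' : xs.count x + 1 < n := by simpa using h
      have hn : n ≠ 1 := by omega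
      simp [pvPref, hn, ih (n - 1) (by omega)]
    · have h' : xs.count c < n := by simpa [hx] using h
      simp [pvPref, hx, ih n h']

theorem pv_count_pvPref (c : Char) : ∀ (n : Nat) (cs : List Char), 1 ≤ n →
    (pvPref c n cs).count c = min (n - 1) (cs.count c) := by
  intro n cs
  induction cs generalizing n with
  | nil => intro _; simp [pvPref]
  | cons x xs ih =>
    intro hn
    by_cases hx : x = c
    · subst hx
      by_cases h1 : n = 1
      · simp [pvPref, h1]
      · simp [pvPref, h1, List.count_cons, ih (n - 1) (by omega)]
        omega
    · simp [pvPref, hx, List.count_cons, Ne.symm hx, ih n hn]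

theorem pvPref_append (c : Char) : ∀ (u v : List Char),
    pvPref c (u.count c + 1) (u ++ c :: v) = u := by
  intro u v
  induction u with
  | nil => simp [pvPref]
  | cons x xs ih =>
    by_cases hx : x = c
    · subst hx
      simp [pvPref, List.count_cons, ih]
    · simp [pvPref, hx, List.count_cons, Ne.symm hx, ih]

theorem pvPref_pvPref (c : Char) : ∀ (i n : Nat) (cs : List Char), 1 ≤ i → i < n →
    pvPref c i (pvPref c n cs) = pvPref c i cs := by
  intro i n cs
  induction cs generalizing i n with
  | nil => intro _ _; rfl
  | cons x xs ih =>
    intro hi hin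
    by_cases hx : x = c
    · subst hx
      have hn1 : n ≠ 1 := by omega
      by_cases hi1 : i = 1
      · simp [pvPref, hn1, hi1]
      · simp [pvPref, hn1, hi1, ih (i - 1) (n - 1) (by omega) (by omega)]
    · simp [pvPref, hx, ih i n hi hin]

-- decomposition of a list at the last occurrence of c, with pvRsplitDropA's value
theorem pvRsplitDropA_decomp (c : Char) (cs : List Char) (h : c ∈ cs) :
    ∃ u v, cs = u ++ c :: v ∧ c ∉ v ∧ pvRsplitDropA cs c = u := by
  have hrev : c ∈ cs.reverse := by simpa using h
  have hsplit := List.takeWhile_append_dropWhile (p := fun x => x != c) (l := cs.reverse)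
  have hne : cs.reverse.dropWhile (fun x => x != c) ≠ [] := by
    intro hnil
    have hx : c ∈ List.takeWhile (fun x => x != c) cs.reverse := by
      rw [hnil] at hsplit
      have hsp2 : List.takeWhile (fun x => x != c) cs.reverse = cs.reverse := by
        simpa using hsplit
      rwa [hsp2]
    have := List.mem_takeWhile_imp hx
    simp at this
  obtain ⟨w, hw⟩ : ∃ w, cs.reverse.dropWhile (fun x => x != c) = c :: w := by
    cases hd : cs.reverse.dropWhile (fun x => x != c) with
    | nil => exact absurd hd hne
    | cons y w =>
      have hy := List.head_dropWhile_not (p := fun x => x != c) (l := cs.reverse) (by simp [hd])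
      simp [hd] at hy
      exact ⟨w, by simpa [hy] using hd⟩
  have hdec : cs.reverse = cs.reverse.takeWhile (fun x => x != c) ++ c :: w := by
    rw [← hw]; exact hsplit.symm
  refine ⟨w.reverse, (cs.reverse.takeWhile (fun x => x != c)).reverse, ?_, ?_, ?_⟩
  · have := congrArg List.reverse hdec
    simpa using this
  · intro hc
    have := List.mem_takeWhile_imp (l := cs.reverse) (p := fun x => x != c) (by simpa using hc)
    simp at this
  · simp [pvRsplitDropA, hw]

theorem pvRsplitDropA_eq_pvPref (c : Char) (cs : List Char) (h : c ∈ cs) :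
    pvRsplitDropA cs c = pvPref c (cs.count c) cs := by
  obtain ⟨u, v, rfl, hv, hdrop⟩ := pvRsplitDropA_decomp c cs h
  have hcv : v.count c = 0 := List.count_eq_zero.mpr hv
  have hcount : (u ++ c :: v).count c = u.count c + 1 := by
    simp [List.count_append, List.count_cons, hcv]
  rw [hdrop, hcount, pvPref_append]

theorem pv_isIn_of_mem (c : Char) (l : List Char) (h : c ∈ l) :
    PySem.Chars.isIn [c] l = true := by
  rw [PySem.Chars.isIn_iff_infix]
  obtain ⟨s, t, rfl⟩ := List.append_of_mem h
  exact ⟨s, t, by simp⟩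

-- A's removal loop computes the prefix before the (count - d + 1)-th occurrence
theorem pv_foldA (c : Char) (cs : List Char) : ∀ (d : Nat), d ≤ cs.count c →
    (List.range d).foldl
      (fun l _ => if PySem.Chars.isIn [c] l then pvRsplitDropA l c else l) cs
    = pvPref c (cs.count c - d + 1) cs := by
  intro d
  induction d with
  | zero =>
    intro _
    simp [pvPref_of_count_lt c (cs.count c + 1) cs (by omega)]
  | succ d ih =>
    intro hd
    rw [List.range_succ, List.foldl_append, ih (by omega)]
    simp only [List.foldl_cons, List.foldl_nil]
    set x := pvPref c (cs.count c - d + 1) cs with hx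
    have hcx : x.count c = cs.count c - d := by
      rw [hx, pv_count_pvPref c _ cs (by omega)]; omega
    have hmem : c ∈ x := by
      rw [← List.count_pos_iff]; omega
    rw [if_pos (pv_isIn_of_mem c x hmem), pvRsplitDropA_eq_pvPref c x hmem, hcx, hx,
        pvPref_pvPref c (cs.count c - d) (cs.count c - d + 1) cs (by omega) (by omega)]
    congr 1
    omega

-- B's scan computes the prefix before the n-th occurrence
theorem pv_cutGo (ch : Char) (n : Nat) (line : List Char) :
    ∀ (rest out : List Char) (seen : Nat), line = out ++ rest → seen < n →
    pvCutGo ch n line rest seen out = out ++ pvPref ch (n - seen) rest := by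
  intro rest
  induction rest with
  | nil => intro out seen hline _; simpa [pvCutGo, pvPref] using hline
  | cons x rest ih =>
    intro out seen hline hseen
    by_cases hx : x = ch
    · by_cases hs : seen + 1 = n
      · simp [pvCutGo, hx, hs, pvPref, (by omega : n - seen = 1)]
      · have hrec := ih (out ++ [x]) (seen + 1) (by simp [hline]) (by omega)
        rw [hx] at hrec
        have h1 : n - seen ≠ 1 := by omega
        have h2 : n - (seen + 1) = n - seen - 1 := by omega
        simp [pvCutGo, hx, hs, hrec, pvPref, h1, h2]
    · have hrec := ih (out ++ [x]) seen (by simp [hline]) hseen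
      simp [pvCutGo, hx, hrec, pvPref]

theorem pvCutBeforeNth_eq_pvPref (line : List Char) (ch : Char) (n : Nat) (h : 1 ≤ n) :
    pvCutBeforeNth line ch n = pvPref ch n line := by
  have := pv_cutGo ch n line line [] 0 (by simp) (by omega)
  simpa [pvCutBeforeNth] using this

-- one delimiter pair: A's branch equals B's branch
theorem pv_pair_eq (op cl : Char) (line : List Char) :
    (if PySem.Chars.count line [op] > PySem.Chars.count line [cl] then
      (if PySem.Chars.endswith (PySem.Chars.rstrip line) [','] then line
       else line ++ List.replicate (PySem.Chars.count line [op] - PySem.Chars.count line [cl]) cl)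
    else if PySem.Chars.count line [cl] > PySem.Chars.count line [op] then
      (List.range (PySem.Chars.count line [cl] - PySem.Chars.count line [op])).foldl
        (fun l _ => if PySem.Chars.isIn [cl] l then pvRsplitDropA l cl else l) line
    else line)
    =
    (if PySem.Chars.count line [op] > PySem.Chars.count line [cl] then
      (if PySem.Chars.endswith (PySem.Chars.rstrip line) [','] then line
       else line ++ List.replicate (PySem.Chars.count line [op] - PySem.Chars.count line [cl]) cl)
    else if PySem.Chars.count line [cl] > PySem.Chars.count line [op] then
      pvCutBeforeNth line cl (PySem.Chars.count line [op] + 1)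
    else line) := by
  simp only [pv_count_singleton]
  split_ifs with h1 hend h2
  · rfl
  · rfl
  · rw [pv_foldA cl line (line.count cl - line.count op) (by omega),
        pvCutBeforeNth_eq_pvPref line cl (line.count op + 1) (by omega)]
    congr 1
    omega
  · rfl

theorem pvFixLine_eq (line : List Char) : pvFixLineA line = pvFixLineB line := by
  unfold pvFixLineA pvFixLineB
  simp only [List.foldl_cons, List.foldl_nil]
  rw [pv_pair_eq '[' ']' line]
  exact pv_pair_eq '{' '}' _

-- ===== VERDICT (by name: the statement is the Claim_ definition above) =====
theorem fix_bracket_mismatches_spec : Claim_equal_fix_bracket_mismatches := by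
  intro content _
  unfold Spec_fix_bracket_mismatches fix_bracket_mismatches fix_bracket_mismatches_alt
  rw [funext pvFixLine_eq]
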